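-- pv_equiv track=rewrite | github.com/kwameasare/loop | tests/test_cp_api_image_ci.py | _final_stage
-- ===== SOURCE A (Python) =====
-- def _final_stage(dockerfile: str) -> str:
--     starts = [
--         index
--         for index, line in enumerate(dockerfile.splitlines())
--         if line.upper().startswith("FROM ")
--     ]
--     assert starts
--     return "\n".join(dockerfile.splitlines()[starts[-1] :])
-- ===== SOURCE B (Python) =====
-- def _final_stage(dockerfile: str) -> str:
--     lines = dockerfile.splitlines()
--     for i in range(len(lines) - 1, -1, -1):
--         if lines[i].upper().startswith("FROM "):
--             return "\n".join(lines[i:])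
--     assert False
-- ===== Notes on version B (the rewrite author's own statement) =====
-- stated objective: simpler
-- what changed: A collects every FROM-line index into a list and then slices at the last one (splitting the dockerfile twice); B splits once and scans the lines backwards, returning the joined suffix at the first (i.e. last) FROM line it meets.
import Mathlib
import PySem

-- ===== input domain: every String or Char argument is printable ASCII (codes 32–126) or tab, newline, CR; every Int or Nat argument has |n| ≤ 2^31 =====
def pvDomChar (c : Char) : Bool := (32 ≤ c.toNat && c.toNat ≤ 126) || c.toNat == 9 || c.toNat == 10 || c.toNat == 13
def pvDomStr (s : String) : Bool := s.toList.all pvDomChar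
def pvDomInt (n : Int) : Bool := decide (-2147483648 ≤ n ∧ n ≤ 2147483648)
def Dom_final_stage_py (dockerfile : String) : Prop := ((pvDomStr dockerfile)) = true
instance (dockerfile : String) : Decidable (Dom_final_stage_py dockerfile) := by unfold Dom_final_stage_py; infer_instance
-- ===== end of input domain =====

-- B splits the dockerfile once and scans the lines backwards, returning the joined suffix at the
-- first (i.e. last) case-insensitive "FROM " line, instead of A's collect-all-indices-then-slice.


-- ===== PORT A =====
def final_stage_py (dockerfile : String) : String :=
  let lines := PySem.Str.splitlines dockerfile
  let starts := (PySem.List.enumerate lines 0).foldl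
    (fun acc q => if PySem.Str.startswith (PySem.Str.upper q.2) "FROM " then acc ++ [q.1] else acc) []
  match PySem.List.pyGet? starts (-1) with
  | some i => PySem.Str.join "\n" (PySem.List.slice (PySem.Str.splitlines dockerfile) (some i) none)
  | none => ""   -- `assert starts` fails: AssertionError, outside Pre_

-- ===== PORT B =====
-- the `for i in range(len(lines) - 1, -1, -1)` countdown loop of Source B
def altGo (lines : List String) : Nat → Option String
  | 0 => none
  | n + 1 =>
    if PySem.Str.startswith (PySem.Str.upper (lines.getD n "")) "FROM " then
      some (PySem.Str.join "\n" (lines.drop n))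
    else altGo lines n

def final_stage_py_alt (dockerfile : String) : String :=
  let lines := PySem.Str.splitlines dockerfile
  (altGo lines lines.length).getD ""   -- none = `assert False`: AssertionError, outside Pre_

-- ===== PRECONDITION & SPEC =====
-- Pre_ excludes exactly the dockerfiles with no line starting (case-insensitively) with "FROM ":
-- there A's `assert starts` raises AssertionError (and B's `assert False` raises it too).
def Pre_final_stage_py (dockerfile : String) : Prop :=
  ∃ line ∈ PySem.Str.splitlines dockerfile, PySem.Str.startswith (PySem.Str.upper line) "FROM " = true
instance (dockerfile : String) : Decidable (Pre_final_stage_py dockerfile) := by unfold Pre_final_stage_py; infer_instance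
def pvWitness_final_stage_py : String := "FROM alpine\nRUN x"
def Spec_final_stage_py (dockerfile : String) (out : String) : Prop := out = final_stage_py_alt dockerfile
instance (dockerfile : String) (out : String) : Decidable (Spec_final_stage_py dockerfile out) := by unfold Spec_final_stage_py; infer_instance

-- ===== CLAIM (what is proved, stated in full; the proofs are below) =====
def Claim_equal_final_stage_py : Prop := ∀ (dockerfile : String), Dom_final_stage_py dockerfile → Pre_final_stage_py dockerfile → Spec_final_stage_py dockerfile (final_stage_py dockerfile)

-- ===== LEMMAS AND PROOFS =====
-- B's countdown loop over the first k lines computes exactly "map-the-last-kept-index" of A's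
-- filtered enumeration of those k lines.
lemma altGo_eq (lines : List String) (k : Nat) (hk : k ≤ lines.length) :
    altGo lines k =
      ((((PySem.List.enumerate (lines.take k) 0).filter
          (fun q => PySem.Str.startswith (PySem.Str.upper q.2) "FROM ")).map Prod.fst).getLast?).map
        (fun i => PySem.Str.join "\n" (PySem.List.slice lines (some i) none)) := by
  induction k with
  | zero => rfl
  | succ n ih =>
    have hn : n < lines.length := hk
    have htake : lines.take (n + 1) = lines.take n ++ [lines[n]] := by
      rw [List.take_add_one, List.getElem?_eq_getElem hn]; rfl
    have hget : lines.getD n "" = lines[n] := by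
      simp [List.getD, List.getElem?_eq_getElem hn]
    have hlen : (lines.take n).length = n := by simp [Nat.le_of_lt hn]
    rw [altGo, htake, PySem.List.enumerate_append, hlen, List.filter_append,
      List.map_append, List.getLast?_append, PySem.List.enumerate_cons,
      PySem.List.enumerate_nil, hget]
    by_cases hp : PySem.Str.startswith (PySem.Str.upper lines[n]) "FROM " = true
    · rw [if_pos hp, List.filter_cons_of_pos (by exact hp), List.filter_nil]
      rw [List.map_cons, List.map_nil, List.getLast?_singleton, Option.some_or,
        Option.map_some]
      simp only [zero_add]
      rw [PySem.List.slice_from_natCast]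
    · rw [if_neg hp, List.filter_cons_of_neg (by exact hp), List.filter_nil,
        List.map_nil, List.getLast?_nil, Option.none_or]
      exact ih (Nat.le_of_lt hn)

-- ===== VERDICT (by name: the statement is the Claim_ definition above) =====
theorem final_stage_py_spec : Claim_equal_final_stage_py := by
  intro d _ hpre
  unfold Spec_final_stage_py final_stage_py final_stage_py_alt
  simp only []
  have hfold : (PySem.List.enumerate (PySem.Str.splitlines d) 0).foldl
      (fun acc q => if PySem.Str.startswith (PySem.Str.upper q.2) "FROM " then acc ++ [q.1] else acc) []
      = ((PySem.List.enumerate (PySem.Str.splitlines d) 0).filter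
          (fun q => PySem.Str.startswith (PySem.Str.upper q.2) "FROM ")).map Prod.fst :=
    (PySem.List.foldl_append_if _ _ _ _).trans (List.nil_append _)
  have hmain := altGo_eq (PySem.Str.splitlines d) (PySem.Str.splitlines d).length (Nat.le_refl _)
  rw [List.take_length] at hmain
  obtain ⟨line, hmem, hline⟩ := hpre
  have hne : ((PySem.List.enumerate (PySem.Str.splitlines d) 0).filter
      (fun q => PySem.Str.startswith (PySem.Str.upper q.2) "FROM ")).map Prod.fst ≠ [] := by
    have hm : line ∈ (PySem.List.enumerate (PySem.Str.splitlines d) 0).map (·.2) := by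
      rw [PySem.List.map_snd_enumerate]; exact hmem
    obtain ⟨q, hq, hq2⟩ := List.mem_map.mp hm
    have : q ∈ (PySem.List.enumerate (PySem.Str.splitlines d) 0).filter
        (fun q => PySem.Str.startswith (PySem.Str.upper q.2) "FROM ") :=
      List.mem_filter.mpr ⟨hq, by rw [hq2]; exact hline⟩
    intro hempty
    rw [List.map_eq_nil_iff] at hempty
    rw [hempty] at this
    exact absurd this (List.not_mem_nil)
  obtain ⟨i, hi⟩ := Option.ne_none_iff_exists'.mp (mt List.getLast?_eq_none_iff.mp hne)
  rw [hfold, PySem.List.pyGet?_neg_one, hi]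
  rw [hi, Option.map_some] at hmain
  rw [hmain]
  rfl
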